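-- pv_equiv track=rewrite | github.com/Shubham-Choudhury/GeeksforGeeks-Problems | 2024/06 June/Construct list using given q XOR queries/main.py | constructList
-- ===== SOURCE A (Python) =====
-- from typing import List
--
-- def constructList(q: int, queries: List[List[int]]) -> List[int]:
--     xr = 0
--     ans = []
--     for i in range(len(queries) - 1, -1, -1):
--         if queries[i][0] == 0:
--             ans.append(queries[i][1] ^ xr)
--         else:
--             xr ^= queries[i][1]
--
--     ans.append(xr)
--     ans.sort()
--     return ans
-- ===== SOURCE B (Python) =====
-- def constructList(q, queries):
--     total = 0
--     for query in queries:
--         if query[0] != 0: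
--             total ^= query[1]
--     ans = []
--     prefix = 0
--     for query in queries:
--         if query[0] == 0:
--             ans.append(query[1] ^ (total ^ prefix))
--         else:
--             prefix ^= query[1]
--     ans.append(total)
--     return sorted(ans)
-- ===== Notes on version B (the rewrite author's own statement) =====
-- stated objective: alternative
-- what changed: Replaces A's single backward pass that accumulates the suffix XOR with a two-pass forward decomposition: one pass precomputes the total XOR of all type-1 values, a second forward pass maintains a prefix XOR and emits value ^ (total ^ prefix) for each type-0 query.
import Mathlib
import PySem

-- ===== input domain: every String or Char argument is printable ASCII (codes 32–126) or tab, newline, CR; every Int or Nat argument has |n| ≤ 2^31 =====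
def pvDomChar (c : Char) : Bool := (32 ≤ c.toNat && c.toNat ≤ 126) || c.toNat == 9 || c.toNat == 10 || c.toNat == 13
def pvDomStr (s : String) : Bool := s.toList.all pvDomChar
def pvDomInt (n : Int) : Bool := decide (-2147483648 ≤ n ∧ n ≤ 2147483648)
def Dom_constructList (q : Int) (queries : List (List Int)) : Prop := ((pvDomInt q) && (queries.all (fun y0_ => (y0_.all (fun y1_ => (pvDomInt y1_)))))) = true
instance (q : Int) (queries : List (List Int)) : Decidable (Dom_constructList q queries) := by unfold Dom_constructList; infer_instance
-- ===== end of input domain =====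

-- B replaces A's single backward suffix-XOR scan with a precomputed total XOR plus a forward
-- prefix-XOR pass (objective: alternative decomposition, same cost).


-- ===== PORT A =====
-- Literal port of A: backward index loop 'for i in range(len(queries)-1, -1, -1)' carrying
-- (xr, ans); queries[i][j] is PySem.List.pyGetD (indices in range under Pre_); then
-- ans.append(xr); ans.sort().
def constructList (q : Int) (queries : List (List Int)) : List Int :=
  let st : Int × List Int :=
    (PySem.List.pyRange ((queries.length : Int) - 1) (-1) (-1)).foldl
      (fun (s : Int × List Int) i =>
        if PySem.List.pyGetD (PySem.List.pyGetD queries i []) 0 0 = 0 then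
          (s.1, s.2 ++ [PySem.Int.bxor (PySem.List.pyGetD (PySem.List.pyGetD queries i []) 1 0) s.1])
        else
          (PySem.Int.bxor s.1 (PySem.List.pyGetD (PySem.List.pyGetD queries i []) 1 0), s.2))
      (0, [])
  PySem.List.sorted (st.2 ++ [st.1]) (fun x => x) false

-- ===== PORT B =====
-- Literal port of B (Source B): first forward pass computes total, second forward pass carries
-- (prefix, ans) and appends value ^ (total ^ prefix) for type-0 queries; then sorted(ans + [total]).
def constructList_alt (q : Int) (queries : List (List Int)) : List Int :=
  let total : Int :=
    queries.foldl
      (fun t query =>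
        if PySem.List.pyGetD query 0 0 ≠ 0 then PySem.Int.bxor t (PySem.List.pyGetD query 1 0) else t)
      0
  let st : Int × List Int :=
    queries.foldl
      (fun (s : Int × List Int) query =>
        if PySem.List.pyGetD query 0 0 = 0 then
          (s.1, s.2 ++ [PySem.Int.bxor (PySem.List.pyGetD query 1 0) (PySem.Int.bxor total s.1)])
        else
          (PySem.Int.bxor s.1 (PySem.List.pyGetD query 1 0), s.2))
      (0, [])
  PySem.List.sorted (st.2 ++ [total]) (fun x => x) false

-- ===== PRECONDITION & SPEC =====
-- Pre_ excludes exactly the inputs where Python A raises IndexError: an inner query list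
-- shorter than 2 (each iteration reads query[0] and then query[1] in either branch).
def Pre_constructList (q : Int) (queries : List (List Int)) : Prop :=
  ∀ qs ∈ queries, 2 ≤ qs.length
instance (q : Int) (queries : List (List Int)) : Decidable (Pre_constructList q queries) := by
  unfold Pre_constructList; infer_instance
def pvWitness_constructList : Int × List (List Int) := (3, [[0, 5], [1, 3], [0, 2]])

def Spec_constructList (q : Int) (queries : List (List Int)) (out : List Int) : Prop := out = constructList_alt q queries
instance (q : Int) (queries : List (List Int)) (out : List Int) : Decidable (Spec_constructList q queries out) := by unfold Spec_constructList; infer_instance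

-- ===== CLAIM (what is proved, stated in full; the proofs are below) =====
def Claim_equal_constructList : Prop := ∀ (q : Int) (queries : List (List Int)), Dom_constructList q queries → Pre_constructList q queries → Spec_constructList q queries (constructList q queries)

-- ===== LEMMAS AND PROOFS =====

-- XOR algebra for PySem.Int.bxor: a sign/magnitude (ones'-complement) encoding, used only to
-- derive associativity from Bool.xor and Nat.xor.
def pvEnc (n : Int) : Bool × Nat := if 0 ≤ n then (false, n.toNat) else (true, (-n).toNat - 1)
def pvDec (p : Bool × Nat) : Int := if p.1 then -(p.2 : Int) - 1 else (p.2 : Int)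

theorem pvEnc_dec (p : Bool × Nat) : pvEnc (pvDec p) = p := by
  unfold pvEnc pvDec
  rcases p with ⟨s, m⟩
  cases s <;> simp_all
  rw [if_neg (by omega)]
  simp
  omega

theorem pvBxor_eq (a b : Int) :
    PySem.Int.bxor a b = pvDec (xor (pvEnc a).1 (pvEnc b).1, (pvEnc a).2 ^^^ (pvEnc b).2) := by
  unfold PySem.Int.bxor pvEnc pvDec
  split_ifs <;> simp_all

theorem pvBxor_assoc (a b c : Int) :
    PySem.Int.bxor (PySem.Int.bxor a b) c = PySem.Int.bxor a (PySem.Int.bxor b c) := by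
  rw [pvBxor_eq a b, pvBxor_eq b c, pvBxor_eq _ c, pvBxor_eq a, pvEnc_dec, pvEnc_dec]
  simp [Nat.xor_assoc]

theorem pvBxor_zero_left (a : Int) : PySem.Int.bxor 0 a = a := by
  rw [PySem.Int.bxor_comm]; simp

-- A's loop body as a step function on the state (xr, ans).
def pvStepA (s : Int × List Int) (qy : List Int) : Int × List Int :=
  if PySem.List.pyGetD qy 0 0 = 0 then
    (s.1, s.2 ++ [PySem.Int.bxor (PySem.List.pyGetD qy 1 0) s.1])
  else (PySem.Int.bxor s.1 (PySem.List.pyGetD qy 1 0), s.2)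

-- A's state after the backward loop, by structural recursion on the query list
-- (the head query, having the smallest index, is processed last).
def pvA : List (List Int) → Int × List Int
  | [] => (0, [])
  | qy :: l => pvStepA (pvA l) qy

-- The ans list B's second pass produces, given total and the running prefix.
def pvBans (total : Int) (p : Int) : List (List Int) → List Int
  | [] => []
  | qy :: l =>
    if PySem.List.pyGetD qy 0 0 = 0 then
      PySem.Int.bxor (PySem.List.pyGetD qy 1 0) (PySem.Int.bxor total p) :: pvBans total p l
    else pvBans total (PySem.Int.bxor p (PySem.List.pyGetD qy 1 0)) l

-- A's backward index loop is the fold of pvStepA over the reversed query list.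
theorem pvA_loop (queries : List (List Int)) (init : Int × List Int) :
    (PySem.List.pyRange ((queries.length : Int) - 1) (-1) (-1)).foldl
      (fun s i => pvStepA s (PySem.List.pyGetD queries i [])) init
    = queries.reverse.foldl pvStepA init := by
  have h : PySem.List.pyRange ((queries.length : Int) - 1) (-1) (-1)
      = (PySem.List.pyRange 0 (queries.length : Int) 1).reverse := by
    rw [PySem.List.pyRange_neg_one_eq_reverse]; norm_num
  rw [h, ← List.foldl_map, List.map_reverse, PySem.List.map_pyGetD_pyRange_zero']

theorem pvA_rev_foldl (queries : List (List Int)) :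
    queries.reverse.foldl pvStepA (0, []) = pvA queries := by
  induction queries with
  | nil => rfl
  | cons qy l ih => rw [List.reverse_cons, List.foldl_append, ih]; rfl

-- B's first pass: total from init t is t XOR (A's final xr).
theorem pvB_total_foldl (l : List (List Int)) (t : Int) :
    l.foldl
      (fun t query =>
        if PySem.List.pyGetD query 0 0 ≠ 0 then PySem.Int.bxor t (PySem.List.pyGetD query 1 0) else t)
      t = PySem.Int.bxor t (pvA l).1 := by
  induction l generalizing t with
  | nil => simp [pvA]
  | cons qy l ih =>
      rw [List.foldl_cons]
      by_cases h : PySem.List.pyGetD qy 0 0 = 0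
      · rw [if_neg (not_not_intro h), ih]
        simp [pvA, pvStepA, h]
      · rw [if_pos h, ih]
        have h1 : (pvA (qy :: l)).1 = PySem.Int.bxor (pvA l).1 (PySem.List.pyGetD qy 1 0) := by
          simp [pvA, pvStepA, h]
        rw [h1, pvBxor_assoc, PySem.Int.bxor_comm (PySem.List.pyGetD qy 1 0) (pvA l).1]

-- B's second pass, unfolded to the cons-structured pvBans.
theorem pvB_ans_foldl (total : Int) (l : List (List Int)) (p : Int) (acc : List Int) :
    (l.foldl
      (fun (s : Int × List Int) query =>
        if PySem.List.pyGetD query 0 0 = 0 then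
          (s.1, s.2 ++ [PySem.Int.bxor (PySem.List.pyGetD query 1 0) (PySem.Int.bxor total s.1)])
        else
          (PySem.Int.bxor s.1 (PySem.List.pyGetD query 1 0), s.2))
      (p, acc)).2 = acc ++ pvBans total p l := by
  induction l generalizing p acc with
  | nil => simp [pvBans]
  | cons qy l ih =>
      rw [List.foldl_cons]
      by_cases h : PySem.List.pyGetD qy 0 0 = 0
      · rw [if_pos h, ih]; simp [pvBans, h]
      · rw [if_neg h, ih]; simp [pvBans, h]

-- Core invariant: when bxor total p is the XOR of the type-1 values of the remaining list,
-- B's forward pass produces exactly the reverse of A's ans list.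
theorem pvBans_eq_revA (l : List (List Int)) (total p : Int)
    (h : PySem.Int.bxor total p = (pvA l).1) :
    pvBans total p l = ((pvA l).2).reverse := by
  induction l generalizing p with
  | nil => rfl
  | cons qy l ih =>
      by_cases h0 : PySem.List.pyGetD qy 0 0 = 0
      · have h1 : (pvA (qy :: l)).1 = (pvA l).1 := by simp [pvA, pvStepA, h0]
        rw [h1] at h
        rw [pvBans, if_pos h0, ih p h]
        simp [pvA, pvStepA, h0, h]
      · have h1 : (pvA (qy :: l)).1 = PySem.Int.bxor (pvA l).1 (PySem.List.pyGetD qy 1 0) := by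
          simp [pvA, pvStepA, h0]
        rw [h1] at h
        rw [pvBans, if_neg h0, ih _ (by rw [← pvBxor_assoc, h, pvBxor_assoc]; simp)]
        simp [pvA, pvStepA, h0]

-- ===== VERDICT (by name: the statement is the Claim_ definition above) =====
theorem constructList_spec : Claim_equal_constructList := by
  intro q queries _ _
  show constructList q queries = constructList_alt q queries
  unfold constructList constructList_alt
  show PySem.List.sorted
      (((PySem.List.pyRange ((queries.length : Int) - 1) (-1) (-1)).foldl
          (fun s i => pvStepA s (PySem.List.pyGetD queries i [])) ((0 : Int), ([] : List Int))).2
        ++ [((PySem.List.pyRange ((queries.length : Int) - 1) (-1) (-1)).foldl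
          (fun s i => pvStepA s (PySem.List.pyGetD queries i [])) ((0 : Int), ([] : List Int))).1])
      (fun x => x) false
    = PySem.List.sorted
      ((queries.foldl
          (fun (s : Int × List Int) query =>
            if PySem.List.pyGetD query 0 0 = 0 then
              (s.1, s.2 ++ [PySem.Int.bxor (PySem.List.pyGetD query 1 0)
                (PySem.Int.bxor
                  (queries.foldl (fun t query => if PySem.List.pyGetD query 0 0 ≠ 0 then
                    PySem.Int.bxor t (PySem.List.pyGetD query 1 0) else t) 0) s.1)])
            else (PySem.Int.bxor s.1 (PySem.List.pyGetD query 1 0), s.2))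
          ((0 : Int), ([] : List Int))).2
        ++ [queries.foldl (fun t query => if PySem.List.pyGetD query 0 0 ≠ 0 then
              PySem.Int.bxor t (PySem.List.pyGetD query 1 0) else t) 0])
      (fun x => x) false
  rw [pvA_loop, pvA_rev_foldl, pvB_total_foldl, pvBxor_zero_left, pvB_ans_foldl, List.nil_append,
    pvBans_eq_revA queries (pvA queries).1 0 (by simp)]
  exact PySem.List.sorted_eq_sorted_of_perm _ _ _ (fun a b hab => hab)
    ((List.reverse_perm (pvA queries).2).symm.append_right [(pvA queries).1])
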